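-- pv_equiv track=rewrite | github.com/tangram-bot/code | test/shadow.py | tri_wok
-- ===== SOURCE A (Python) =====
-- def tri_wok(edges: list, start_vertex: str, current_vertex: str, split_vertices: list[str]) -> list | None:
--
--     # sind wir wieder am start_vertex?
--     # Falls ja: Pfad ist vollständig -> wir müssen nicht weiter suchen
--     if current_vertex == start_vertex:
--         return []
--
--     # sind wir an einem Split Vertex, der nicht start_vertex ist?
--     # falls ja: Abbruch
--     for sv in split_vertices:
--         v_str = str(sv)
--         if v_str == current_vertex and v_str != start_vertex:
--             return None
--
--     # weiter den Kanten folgen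
--     for e_idx in range(len(edges)):
--         edge = edges[e_idx]
--
--         # Beide Endpunkte der Kante betrachten
--         for i in range(2):
--             v_str = str(edge[i])
--
--             # Wenn v_str == current_vertex, dann grenzt edge an den aktuellen Vertex
--             # => die Kante kommt für den Pfad in Frage
--             if v_str == current_vertex:
--
--                 # Aktuelle Kante aus edges entfernen, damit sie bei
--                 # rekursiven Aufrufen nicht erneut benutzt wird
--                 ee = edges.copy()
--                 ee.pop(e_idx)
--
--                 # Rekursiver Aufruf, um den Pfad weiter aufzubauen
--                 sub_shadow = tri_wok(ee, start_vertex, str(edge[1-i]), split_vertices)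
--
--                 # None wird nur zurückgegeben, wenn der Pfad ungültig ist
--                 # es kann also einfach weitergegeben werden
--                 if sub_shadow is None:
--                     return None
--
--                 # Aktuelle Kante zum Shadow hinzufügen, wenn der Pfad gültig ist
--                 sub_shadow.append(edge)
--
--                 return sub_shadow
--
--     return None
-- ===== SOURCE B (Python) =====
-- def tri_wok(edges: list, start_vertex: str, current_vertex: str, split_vertices: list[str]) -> list | None:
--     # Iterative greedy walk: used-flags over the original edge list instead of
--     # recursion with repeated list copies; path collected forward and reversed once.
--     stop = {str(sv) for sv in split_vertices if str(sv) != start_vertex}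
--     used = [False] * len(edges)
--     path = []
--     cv = current_vertex
--     while cv != start_vertex:
--         if cv in stop:
--             return None
--         for k in range(len(edges)):
--             if used[k]:
--                 continue
--             edge = edges[k]
--             a, b = str(edge[0]), str(edge[1])
--             if a == cv:
--                 nxt = b
--             elif b == cv:
--                 nxt = a
--             else:
--                 continue
--             used[k] = True
--             path.append(edge)
--             cv = nxt
--             break
--         else:
--             return None
--     return list(reversed(path))
-- ===== Notes on version B (the rewrite author's own statement) =====
-- stated objective: alternative
-- what changed: Replaced the recursion that copies the whole edge list at every step (edges.copy()+pop) with a single iterative walk over the original list using a used-flag array, accumulating the path forward and reversing it once at the end.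
import Mathlib
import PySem

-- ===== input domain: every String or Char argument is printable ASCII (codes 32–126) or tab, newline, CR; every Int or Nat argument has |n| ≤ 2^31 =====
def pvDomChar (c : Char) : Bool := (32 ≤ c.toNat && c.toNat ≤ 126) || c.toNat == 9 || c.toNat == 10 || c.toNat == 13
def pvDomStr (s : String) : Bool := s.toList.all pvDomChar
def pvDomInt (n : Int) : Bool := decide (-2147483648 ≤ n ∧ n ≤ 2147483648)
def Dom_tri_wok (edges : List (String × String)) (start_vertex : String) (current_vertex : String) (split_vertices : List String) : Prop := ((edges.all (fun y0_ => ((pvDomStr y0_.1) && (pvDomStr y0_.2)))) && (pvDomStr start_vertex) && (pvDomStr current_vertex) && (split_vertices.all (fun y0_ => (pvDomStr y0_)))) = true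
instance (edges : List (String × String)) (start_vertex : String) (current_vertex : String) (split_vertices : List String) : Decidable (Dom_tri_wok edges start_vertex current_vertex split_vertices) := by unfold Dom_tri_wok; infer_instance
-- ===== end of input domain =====

-- B replaces A's recursion-with-list-copies by one iterative used-flag walk (same values; alternative structure).


-- ===== PORT A =====
-- A's 'for e_idx … for i in range(2)' scan always returns on the first endpoint match,
-- so it is the search for the first incident edge; 'ee = edges.copy(); ee.pop(e_idx)'
-- is returned as the remaining list (same elements, same order).
def findEdgeA (edges : List (String × String)) (cv : String) :
    Option ((String × String) × String × List (String × String)) :=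
  match edges with
  | [] => none
  | e :: rest =>
    if e.1 == cv then some (e, e.2, rest)
    else if e.2 == cv then some (e, e.1, rest)
    else
      match findEdgeA rest cv with
      | none => none
      | some (ed, nx, rem) => some (ed, nx, e :: rem)

theorem findEdgeA_length {edges : List (String × String)} {cv : String}
    {ed : String × String} {nx : String} {rem : List (String × String)}
    (h : findEdgeA edges cv = some (ed, nx, rem)) : rem.length < edges.length := by
  induction edges generalizing ed nx rem with
  | nil => simp [findEdgeA] at h
  | cons e rest ih =>
    simp only [findEdgeA] at h
    split_ifs at h
    · cases h; simp
    · cases h; simp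
    · cases hrec : findEdgeA rest cv with
      | none => rw [hrec] at h; cases h
      | some r =>
        obtain ⟨ed', nx', rem'⟩ := r
        rw [hrec] at h
        cases h
        have := ih hrec
        simpa using Nat.succ_lt_succ this

def tri_wok (edges : List (String × String)) (start_vertex : String) (current_vertex : String) (split_vertices : List String) : Option (List (String × String)) :=
  if current_vertex == start_vertex then some []
  else if split_vertices.any (fun sv => sv == current_vertex && sv != start_vertex) then none
  else
    match h : findEdgeA edges current_vertex with
    | none => none
    | some (ed, nx, rem) =>
      match tri_wok rem start_vertex nx split_vertices with
      | none => none
      | some sub => some (sub ++ [ed])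
termination_by edges.length
decreasing_by exact findEdgeA_length h

-- ===== PORT B =====
-- B's inner 'for k in range(len(edges))' over unused edges: returns the chosen edge,
-- the next vertex, and the used-flags with that edge now marked.
def bScan (edges : List (String × String)) (used : List Bool) (cv : String) :
    Option ((String × String) × String × List Bool) :=
  match edges, used with
  | e :: es, u :: us =>
    if u then
      match bScan es us cv with
      | none => none
      | some (ed, nx, us') => some (ed, nx, u :: us')
    else if e.1 == cv then some (e, e.2, true :: us)
    else if e.2 == cv then some (e, e.1, true :: us)
    else
      match bScan es us cv with
      | none => none
      | some (ed, nx, us') => some (ed, nx, u :: us')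
  | _, _ => none

theorem bScan_count {edges : List (String × String)} {used : List Bool} {cv : String}
    {ed : String × String} {nx : String} {us' : List Bool}
    (h : bScan edges used cv = some (ed, nx, us')) :
    us'.count false < used.count false := by
  induction edges generalizing used ed nx us' with
  | nil => simp [bScan] at h
  | cons e es ih =>
    cases used with
    | nil => simp [bScan] at h
    | cons u us =>
      simp only [bScan] at h
      split_ifs at h with hu h1 h2
      · cases hrec : bScan es us cv with
        | none => rw [hrec] at h; cases h
        | some r =>
          obtain ⟨ed', nx', us''⟩ := r
          rw [hrec] at h; cases h
          have := ih hrec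
          subst hu
          simpa [List.count_cons] using this
      · cases h
        obtain rfl : u = false := by simpa using hu
        simp
      · cases h
        obtain rfl : u = false := by simpa using hu
        simp
      · cases hrec : bScan es us cv with
        | none => rw [hrec] at h; cases h
        | some r =>
          obtain ⟨ed', nx', us''⟩ := r
          rw [hrec] at h; cases h
          have := ih hrec
          simp only [Bool.not_eq_true] at hu
          subst hu
          simpa [List.count_cons] using this

-- B's while loop: cv ≠ start → check stop set → scan for the next unused incident edge.
def bLoop (edges : List (String × String)) (start_vertex : String)
    (stop : PySem.Set String) (used : List Bool) (path : List (String × String))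
    (cv : String) : Option (List (String × String)) :=
  if cv == start_vertex then some path.reverse
  else if PySem.Set.contains stop cv then none
  else
    match h : bScan edges used cv with
    | none => none
    | some (ed, nx, us') => bLoop edges start_vertex stop us' (path ++ [ed]) nx
termination_by used.count false
decreasing_by exact bScan_count h

def tri_wok_alt (edges : List (String × String)) (start_vertex : String) (current_vertex : String) (split_vertices : List String) : Option (List (String × String)) :=
  bLoop edges start_vertex
    (PySem.Set.ofList (split_vertices.filter (fun sv => sv != start_vertex)))
    (List.replicate edges.length false) [] current_vertex

-- ===== PRECONDITION & SPEC =====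
def Spec_tri_wok (edges : List (String × String)) (start_vertex : String) (current_vertex : String) (split_vertices : List String) (out : Option (List (String × String))) : Prop := out = tri_wok_alt edges start_vertex current_vertex split_vertices
instance (edges : List (String × String)) (start_vertex : String) (current_vertex : String) (split_vertices : List String) (out : Option (List (String × String))) : Decidable (Spec_tri_wok edges start_vertex current_vertex split_vertices out) := by unfold Spec_tri_wok; infer_instance

-- ===== CLAIM (what is proved, stated in full; the proofs are below) =====
def Claim_equal_tri_wok : Prop := ∀ (edges : List (String × String)) (start_vertex : String) (current_vertex : String) (split_vertices : List String), Dom_tri_wok edges start_vertex current_vertex split_vertices → Spec_tri_wok edges start_vertex current_vertex split_vertices (tri_wok edges start_vertex current_vertex split_vertices)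

-- ===== LEMMAS AND PROOFS =====

-- The edges still unused under a flag list.
def maskFilter : List (String × String) → List Bool → List (String × String)
  | e :: es, u :: us => if u then maskFilter es us else e :: maskFilter es us
  | _, _ => []

theorem maskFilter_replicate (edges : List (String × String)) :
    maskFilter edges (List.replicate edges.length false) = edges := by
  induction edges with
  | nil => rfl
  | cons e es ih => simp [maskFilter, List.replicate, ih]

theorem bScan_corr (edges : List (String × String)) (used : List Bool) (cv : String) :
    match bScan edges used cv with
    | none => findEdgeA (maskFilter edges used) cv = none
    | some (ed, nx, us') =>
        findEdgeA (maskFilter edges used) cv = some (ed, nx, maskFilter edges us') := by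
  induction edges generalizing used with
  | nil => cases used <;> simp [bScan, maskFilter, findEdgeA]
  | cons e es ih =>
    cases used with
    | nil => simp [bScan, maskFilter, findEdgeA]
    | cons u us =>
      cases u with
      | true =>
        have := ih us
        cases hrec : bScan es us cv with
        | none =>
          rw [hrec] at this
          simpa [bScan, maskFilter, hrec] using this
        | some r =>
          obtain ⟨ed, nx, us'⟩ := r
          rw [hrec] at this
          simpa [bScan, maskFilter, hrec] using this
      | false =>
        by_cases h1 : e.1 == cv
        · simp [bScan, maskFilter, findEdgeA, h1]
        · by_cases h2 : e.2 == cv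
          · simp [bScan, maskFilter, findEdgeA, h1, h2]
          · have := ih us
            cases hrec : bScan es us cv with
            | none =>
              rw [hrec] at this
              simp [bScan, maskFilter, findEdgeA, h1, h2, hrec, this]
            | some r =>
              obtain ⟨ed, nx, us'⟩ := r
              rw [hrec] at this
              simp [bScan, maskFilter, findEdgeA, h1, h2, hrec, this]

theorem stop_contains (split_vertices : List String) (sv cv : String) :
    PySem.Set.contains (PySem.Set.ofList (split_vertices.filter (fun s => s != sv))) cv
      = split_vertices.any (fun s => s == cv && s != sv) := by
  rcases h : split_vertices.any (fun s => s == cv && s != sv) with _ | _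
  · simp only [List.any_eq_false] at h
    rcases hc : PySem.Set.contains _ cv with _ | _
    · rfl
    · exfalso
      rw [PySem.Set.contains_iff, PySem.Set.mem_ofList, List.mem_filter] at hc
      have := h cv hc.1
      simp [hc.2] at this
  · simp only [List.any_eq_true] at h
    obtain ⟨s, hs, hprop⟩ := h
    simp only [Bool.and_eq_true, beq_iff_eq] at hprop
    obtain ⟨rfl, hne⟩ := hprop
    rw [PySem.Set.contains_iff, PySem.Set.mem_ofList, List.mem_filter]
    exact ⟨hs, hne⟩

theorem tri_wok_step (edges : List (String × String)) (sv cv : String)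
    (splits : List String) (hcv : (cv == sv) = false)
    (hstop : (splits.any (fun s => s == cv && s != sv)) = false) :
    tri_wok edges sv cv splits =
      match findEdgeA edges cv with
      | none => none
      | some (ed, nx, rem) => (tri_wok rem sv nx splits).map (fun sub => sub ++ [ed]) := by
  rw [tri_wok]
  simp only [hcv, hstop, Bool.false_eq_true, if_false]
  split
  · next heq => rw [heq]
  · next ed nx rem heq =>
    rw [heq]
    cases htw : tri_wok rem sv nx splits <;> simp [htw]

theorem bLoop_step (edges : List (String × String)) (sv : String)
    (stop : PySem.Set String) (used : List Bool) (path : List (String × String))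
    (cv : String) (hcv : (cv == sv) = false)
    (hstop : PySem.Set.contains stop cv = false) :
    bLoop edges sv stop used path cv =
      match bScan edges used cv with
      | none => none
      | some (ed, nx, us') => bLoop edges sv stop us' (path ++ [ed]) nx := by
  rw [bLoop]
  simp only [hcv, hstop, Bool.false_eq_true, if_false]
  split
  · next heq => rw [heq]
  · next ed nx us' heq => rw [heq]

theorem bLoop_corr (edges : List (String × String)) (sv : String)
    (splits : List String) (used : List Bool) (path : List (String × String)) (cv : String) :
    bLoop edges sv (PySem.Set.ofList (splits.filter (fun s => s != sv))) used path cv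
      = (tri_wok (maskFilter edges used) sv cv splits).map (· ++ path.reverse) := by
  by_cases hcv : cv == sv
  · rw [bLoop, tri_wok]
    simp [hcv]
  · simp only [Bool.not_eq_true] at hcv
    by_cases hstop : splits.any (fun s => s == cv && s != sv)
    · have hc : PySem.Set.contains (PySem.Set.ofList (splits.filter (fun s => s != sv))) cv = true := by
        rw [stop_contains]; exact hstop
      rw [bLoop, tri_wok]
      simp only [hcv, hc, hstop, Bool.false_eq_true, if_false, if_true, Option.map_none]
    · simp only [Bool.not_eq_true] at hstop
      rw [bLoop_step _ _ _ _ _ _ hcv (by rw [stop_contains]; exact hstop),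
        tri_wok_step _ _ _ _ hcv hstop]
      have hcorr := bScan_corr edges used cv
      cases hscan : bScan edges used cv with
      | none =>
        rw [hscan] at hcorr
        rw [hcorr]
        simp
      | some r =>
        obtain ⟨ed, nx, us'⟩ := r
        rw [hscan] at hcorr
        rw [hcorr]
        dsimp only
        have ih := bLoop_corr edges sv splits us' (path ++ [ed]) nx
        rw [ih]
        cases tri_wok (maskFilter edges us') sv nx splits <;> simp
termination_by used.count false
decreasing_by exact bScan_count hscan

-- ===== VERDICT (by name: the statement is the Claim_ definition above) =====
theorem tri_wok_spec : Claim_equal_tri_wok := by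
  intro edges sv cv splits _
  unfold Spec_tri_wok tri_wok_alt
  rw [bLoop_corr, maskFilter_replicate]
  cases tri_wok edges sv cv splits <;> simp
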